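-- pv_equiv track=rewrite | github.com/ananta888/ananta | agent/runtime_policy.py | normalize_task_kind
-- ===== SOURCE A (Python) =====
-- TASK_KINDS = {"coding", "analysis", "doc", "ops", "research"}
--
-- def normalize_task_kind(task_kind: str | None, prompt: str) -> str:
--     if task_kind:
--         val = str(task_kind).strip().lower()
--         if val in TASK_KINDS:
--             return val
--     text = (prompt or "").lower()
--     if any(k in text for k in ("refactor", "implement", "fix", "code", "test", "bug")):
--         return "coding"
--     if any(k in text for k in ("deploy", "docker", "restart", "kubernetes", "ops", "infrastructure")):
--         return "ops"
--     if any(k in text for k in ("readme", "documentation", "docs", "explain")):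
--         return "doc"
--     if any(k in text for k in ("research", "investigate", "compare", "sources", "report", "analyze market")):
--         return "research"
--     return "analysis"
-- ===== SOURCE B (Python) =====
-- TASK_KINDS = {"coding", "analysis", "doc", "ops", "research"}
--
-- _LABELS = ["coding", "ops", "doc", "research", "analysis"]
--
-- _KEYWORD_PRIORITY = {
--     "refactor": 0, "implement": 0, "fix": 0, "code": 0, "test": 0, "bug": 0,
--     "deploy": 1, "docker": 1, "restart": 1, "kubernetes": 1, "ops": 1,
--     "infrastructure": 1,
--     "readme": 2, "documentation": 2, "docs": 2, "explain": 2,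
--     "research": 3, "investigate": 3, "compare": 3, "sources": 3, "report": 3,
--     "analyze market": 3,
-- }
--
--
-- def normalize_task_kind(task_kind, prompt):
--     if task_kind:
--         val = str(task_kind).strip().lower()
--         if val in TASK_KINDS:
--             return val
--     text = (prompt or "").lower()
--     best = len(_LABELS) - 1
--     for kw, prio in _KEYWORD_PRIORITY.items():
--         if prio < best and kw in text:
--             best = prio
--     return _LABELS[best]
-- ===== Notes on version B (the rewrite author's own statement) =====
-- stated objective: alternative
-- what changed: The four ordered short-circuit any() branches are replaced by one flat keyword-to-priority dict scanned in a single pass that keeps the minimum matched priority, then indexes a label table; correct because A's answer is exactly the label of the smallest-priority group with a matching keyword.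
import Mathlib
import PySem

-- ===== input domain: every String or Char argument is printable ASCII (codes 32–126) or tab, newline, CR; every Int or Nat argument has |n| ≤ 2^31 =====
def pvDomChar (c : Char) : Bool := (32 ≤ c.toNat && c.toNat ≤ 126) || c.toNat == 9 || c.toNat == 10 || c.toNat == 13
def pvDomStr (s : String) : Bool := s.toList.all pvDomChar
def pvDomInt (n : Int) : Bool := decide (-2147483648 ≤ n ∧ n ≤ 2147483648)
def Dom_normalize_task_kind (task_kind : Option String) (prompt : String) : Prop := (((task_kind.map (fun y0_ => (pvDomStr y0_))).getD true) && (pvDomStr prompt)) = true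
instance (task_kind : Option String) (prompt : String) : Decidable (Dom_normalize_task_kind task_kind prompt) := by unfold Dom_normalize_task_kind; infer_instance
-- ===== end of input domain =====

-- B replaces the four ordered short-circuit keyword branches by a flat keyword→priority dict scanned
-- in a single min-accumulator pass, then indexes a label table; same return value.
-- ===== PORT A =====
def TASK_KINDS : PySem.Set String :=
  PySem.Set.ofList ["coding", "analysis", "doc", "ops", "research"]

def normalize_task_kind (task_kind : Option String) (prompt : String) : String :=
  let rest :=
    let text := PySem.Str.lower prompt
    if ["refactor", "implement", "fix", "code", "test", "bug"].any (fun k => PySem.Str.isIn k text) then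
      "coding"
    else if ["deploy", "docker", "restart", "kubernetes", "ops", "infrastructure"].any (fun k => PySem.Str.isIn k text) then
      "ops"
    else if ["readme", "documentation", "docs", "explain"].any (fun k => PySem.Str.isIn k text) then
      "doc"
    else if ["research", "investigate", "compare", "sources", "report", "analyze market"].any (fun k => PySem.Str.isIn k text) then
      "research"
    else
      "analysis"
  match task_kind with
  | some tk =>
      if tk ≠ "" then
        let val := PySem.Str.lower (PySem.Str.strip tk)
        if PySem.Set.contains TASK_KINDS val then val else rest
      else rest
  | none => rest

-- ===== PORT B =====
def LABELS : List String := ["coding", "ops", "doc", "research", "analysis"]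

def KEYWORD_PRIORITY : List (String × Int) :=
  [("refactor", 0), ("implement", 0), ("fix", 0), ("code", 0), ("test", 0), ("bug", 0),
   ("deploy", 1), ("docker", 1), ("restart", 1), ("kubernetes", 1), ("ops", 1), ("infrastructure", 1),
   ("readme", 2), ("documentation", 2), ("docs", 2), ("explain", 2),
   ("research", 3), ("investigate", 3), ("compare", 3), ("sources", 3), ("report", 3), ("analyze market", 3)]

-- the loop body of B's single pass: keep the smallest priority whose keyword occurs in text
def pvStep (text : String) (acc : Int) (p : String × Int) : Int :=
  if p.2 < acc && PySem.Str.isIn p.1 text then p.2 else acc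

def normalize_task_kind_alt (task_kind : Option String) (prompt : String) : String :=
  let rest :=
    let text := PySem.Str.lower prompt
    let best := KEYWORD_PRIORITY.foldl (pvStep text) ((LABELS.length : Int) - 1)
    match PySem.List.pyGet? LABELS best with
    | some s => s
    | none => ""   -- unreachable: 0 ≤ best ≤ 4 (proved below)
  match task_kind with
  | some tk =>
      if tk ≠ "" then
        let val := PySem.Str.lower (PySem.Str.strip tk)
        if PySem.Set.contains TASK_KINDS val then val else rest
      else rest
  | none => rest

-- ===== PRECONDITION & SPEC =====
def Spec_normalize_task_kind (task_kind : Option String) (prompt : String) (out : String) : Prop := out = normalize_task_kind_alt task_kind prompt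
instance (task_kind : Option String) (prompt : String) (out : String) : Decidable (Spec_normalize_task_kind task_kind prompt out) := by unfold Spec_normalize_task_kind; infer_instance

-- ===== CLAIM (what is proved, stated in full; the proofs are below) =====
def Claim_equal_normalize_task_kind : Prop := ∀ (task_kind : Option String) (prompt : String), Dom_normalize_task_kind task_kind prompt → Spec_normalize_task_kind task_kind prompt (normalize_task_kind task_kind prompt)

-- ===== LEMMAS AND PROOFS =====

-- folding one keyword group (constant priority i) starting from acc
theorem fold_group (text : String) (ks : List String) (i acc : Int) :
    (ks.map (fun k => (k, i))).foldl (pvStep text) acc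
      = if i < acc ∧ ks.any (fun k => PySem.Str.isIn k text) then i else acc := by
  induction ks generalizing acc with
  | nil => simp
  | cons k ks ih =>
    rw [List.map_cons, List.foldl_cons, ih]
    simp only [pvStep, List.any_cons, PySem.Str.isIn_eq, Bool.or_eq_true, List.any_eq_true]
    cases hk : PySem.Chars.isIn k.toList text.toList <;>
      by_cases hlt : i < acc <;>
      by_cases ha : ∃ x ∈ ks, PySem.Chars.isIn x.toList text.toList = true <;>
      simp [hk, hlt, ha]

theorem kp_split :
    KEYWORD_PRIORITY
      = (["refactor", "implement", "fix", "code", "test", "bug"].map (fun k => (k, (0 : Int))))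
        ++ (["deploy", "docker", "restart", "kubernetes", "ops", "infrastructure"].map (fun k => (k, (1 : Int))))
        ++ (["readme", "documentation", "docs", "explain"].map (fun k => (k, (2 : Int))))
        ++ (["research", "investigate", "compare", "sources", "report", "analyze market"].map (fun k => (k, (3 : Int)))) := by
  rfl

theorem normalize_task_kind_spec : Claim_equal_normalize_task_kind := by
  intro task_kind prompt _
  unfold Spec_normalize_task_kind normalize_task_kind normalize_task_kind_alt
  have hrest :
      (let text := PySem.Str.lower prompt
       let best := KEYWORD_PRIORITY.foldl (pvStep text) ((LABELS.length : Int) - 1)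
       match PySem.List.pyGet? LABELS best with
       | some s => s
       | none => "")
      = (let text := PySem.Str.lower prompt
         if ["refactor", "implement", "fix", "code", "test", "bug"].any (fun k => PySem.Str.isIn k text) then
           "coding"
         else if ["deploy", "docker", "restart", "kubernetes", "ops", "infrastructure"].any (fun k => PySem.Str.isIn k text) then
           "ops"
         else if ["readme", "documentation", "docs", "explain"].any (fun k => PySem.Str.isIn k text) then
           "doc"
         else if ["research", "investigate", "compare", "sources", "report", "analyze market"].any (fun k => PySem.Str.isIn k text) then
           "research"
         else
           "analysis") := by
    set text := PySem.Str.lower prompt with htext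
    rw [kp_split]
    simp only [List.foldl_append, fold_group]
    generalize (["refactor", "implement", "fix", "code", "test", "bug"].any (fun k => PySem.Str.isIn k text)) = a0
    generalize (["deploy", "docker", "restart", "kubernetes", "ops", "infrastructure"].any (fun k => PySem.Str.isIn k text)) = a1
    generalize (["readme", "documentation", "docs", "explain"].any (fun k => PySem.Str.isIn k text)) = a2
    generalize (["research", "investigate", "compare", "sources", "report", "analyze market"].any (fun k => PySem.Str.isIn k text)) = a3
    cases a0 <;> cases a1 <;> cases a2 <;> cases a3 <;> decide
  rw [← hrest]
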